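-- pv_equiv track=rewrite | github.com/Indy275/suitabilityassessment | plotting/plot_pred.py | translate_names
-- ===== SOURCE A (Python) =====
-- def translate_names(words):
--     to_replace = ['Lng', 'Lat', 'Overstromingsbeeld primaire keringen', 'Overstromingsbeeld regionale keringen',
--                   'Bodemdaling Huidig', 'inundatiediepte T100',
--                   'Bodemberging bij grondwaterstand gelijk aan streefpeil']
--     replace_with = ['Longitude', 'Latitude', 'Flooding risk of primary embankments',
--                     'Flooding risk of regional embankments', 'Ground subsidence',
--                     'Bottlenecks excessive rainwater', 'Soil water storage capacity']
--     for rep, width in zip(to_replace, replace_with):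
--         words = [w.replace(rep, width) for w in words]
--     return words
-- ===== SOURCE B (Python) =====
-- def translate_names(words):
--     table = {'Lng': 'Longitude',
--              'Lat': 'Latitude',
--              'Overstromingsbeeld primaire keringen': 'Flooding risk of primary embankments',
--              'Overstromingsbeeld regionale keringen': 'Flooding risk of regional embankments',
--              'Bodemdaling Huidig': 'Ground subsidence',
--              'inundatiediepte T100': 'Bottlenecks excessive rainwater',
--              'Bodemberging bij grondwaterstand gelijk aan streefpeil': 'Soil water storage capacity'}
--     items = list(table.items())
--
--     def tr(w):
--         out = []
--         i = 0
--         n = len(w)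
--         while i < n:
--             for d, e in items:
--                 if w.startswith(d, i):
--                     out.append(e)
--                     i += len(d)
--                     break
--             else:
--                 out.append(w[i])
--                 i += 1
--         return ''.join(out)
--
--     return [tr(w) for w in words]
-- ===== Notes on version B (the rewrite author's own statement) =====
-- stated objective: alternative
-- what changed: Replaces A's seven sequential whole-list .replace passes with a single left-to-right scan per word that substitutes the first matching Dutch phrase from a table at each position (sound because no phrase overlaps another phrase or any replacement); same asymptotic cost, different algorithm.
import Mathlib
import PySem

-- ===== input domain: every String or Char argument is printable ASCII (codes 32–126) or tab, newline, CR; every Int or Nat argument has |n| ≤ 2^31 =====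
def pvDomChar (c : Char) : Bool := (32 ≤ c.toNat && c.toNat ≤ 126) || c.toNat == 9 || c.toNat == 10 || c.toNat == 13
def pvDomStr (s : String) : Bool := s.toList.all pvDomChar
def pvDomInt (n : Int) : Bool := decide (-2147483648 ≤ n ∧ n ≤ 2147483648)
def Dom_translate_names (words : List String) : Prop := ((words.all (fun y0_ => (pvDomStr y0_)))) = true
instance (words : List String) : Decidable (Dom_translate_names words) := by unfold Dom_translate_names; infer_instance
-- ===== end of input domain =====

-- B replaces A's seven sequential whole-list .replace passes by a single left-to-right
-- scan of each word using a first-match substitution table (sound because no Dutch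
-- phrase overlaps another phrase or any replacement); equivalence is proved for all inputs.

-- ===== PORT A =====
def translate_names (words : List String) : List String :=
  let to_replace : List String := ["Lng", "Lat", "Overstromingsbeeld primaire keringen",
    "Overstromingsbeeld regionale keringen", "Bodemdaling Huidig", "inundatiediepte T100",
    "Bodemberging bij grondwaterstand gelijk aan streefpeil"]
  let replace_with : List String := ["Longitude", "Latitude", "Flooding risk of primary embankments",
    "Flooding risk of regional embankments", "Ground subsidence", "Bottlenecks excessive rainwater",
    "Soil water storage capacity"]
  (to_replace.zip replace_with).foldl
    (fun ws rw => ws.map (fun w => PySem.Str.replace w rw.1 rw.2)) words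

-- ===== PORT B =====
def pvD1 : List Char := "Lng".toList
def pvE1 : List Char := "Longitude".toList
def pvD2 : List Char := "Lat".toList
def pvE2 : List Char := "Latitude".toList
def pvD3 : List Char := "Overstromingsbeeld primaire keringen".toList
def pvE3 : List Char := "Flooding risk of primary embankments".toList
def pvD4 : List Char := "Overstromingsbeeld regionale keringen".toList
def pvE4 : List Char := "Flooding risk of regional embankments".toList
def pvD5 : List Char := "Bodemdaling Huidig".toList
def pvE5 : List Char := "Ground subsidence".toList
def pvD6 : List Char := "inundatiediepte T100".toList
def pvE6 : List Char := "Bottlenecks excessive rainwater".toList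
def pvD7 : List Char := "Bodemberging bij grondwaterstand gelijk aan streefpeil".toList
def pvE7 : List Char := "Soil water storage capacity".toList

-- the substitution table of Source B, in insertion order (first match wins)
def pvTable : List (List Char × List Char) :=
  [(pvD1, pvE1), (pvD2, pvE2), (pvD3, pvE3), (pvD4, pvE4), (pvD5, pvE5), (pvD6, pvE6), (pvD7, pvE7)]

-- the single left-to-right scan of Source B's inner while loop: at each position, the first
-- table entry whose Dutch phrase starts here is emitted and skipped, else the char is kept
def pvScan (l : List Char) : List Char :=
  match l with
  | [] => []
  | c :: t =>
    match pvTable.find? (fun p => p.1.isPrefixOf (c :: t)) with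
    | some p => p.2 ++ pvScan (t.drop (p.1.length - 1))
    | none => c :: pvScan t
termination_by l.length
decreasing_by
  · simp only [List.length_drop, List.length_cons]
    omega
  · simp

def translate_names_alt (words : List String) : List String :=
  words.map (fun w => String.ofList (pvScan w.toList))

-- ===== PRECONDITION & SPEC =====
def Spec_translate_names (words : List String) (out : List String) : Prop := out = translate_names_alt words
instance (words : List String) (out : List String) : Decidable (Spec_translate_names words out) := by unfold Spec_translate_names; infer_instance

-- ===== CLAIM (what is proved, stated in full; the proofs are below) =====
def Claim_equal_translate_names : Prop := ∀ (words : List String), Dom_translate_names words → Spec_translate_names words (translate_names words)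

-- ===== LEMMAS AND PROOFS =====

-- reference form of CPython's str.replace (leftmost, non-overlapping), used to reason
-- about PySem.Chars.replace
def pvRepF (old nw l : List Char) : List Char :=
  if h : old.isPrefixOf l ∧ old ≠ [] then nw ++ pvRepF old nw (l.drop old.length)
  else
    match l with
    | [] => []
    | c :: t => c :: pvRepF old nw t
termination_by l.length
decreasing_by
  · have hp := List.isPrefixOf_iff_prefix.mp h.1
    have h1 : 0 < old.length := List.length_pos_iff.mpr h.2
    have h2 := hp.length_le
    simp only [List.length_drop]
    omega
  · simp

lemma repF_nil (old nw : List Char) : pvRepF old nw [] = [] := by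
  rw [pvRepF]
  split
  · rename_i h
    exact absurd (List.isPrefixOf_iff_prefix.mp h.1) (by simpa [List.prefix_nil] using h.2)
  · rfl

lemma repF_head (old nw : List Char) (c : Char) (t : List Char) (h : ¬ old <+: (c :: t)) :
    pvRepF old nw (c :: t) = c :: pvRepF old nw t := by
  rw [pvRepF]
  split
  · rename_i h'
    exact absurd (List.isPrefixOf_iff_prefix.mp h'.1) h
  · rfl

lemma repF_match (old nw q : List Char) (h : old ≠ []) :
    pvRepF old nw (old ++ q) = nw ++ pvRepF old nw q := by
  rw [pvRepF]
  rw [dif_pos ⟨List.isPrefixOf_iff_prefix.mpr (List.prefix_append _ _), h⟩, List.drop_left]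

-- accumulator/fuel characterisation of PySem.Chars.replace.go
lemma go_acc (old nw : List Char) (hold : old ≠ []) :
    ∀ (fuel : Nat) (l acc : List Char), l.length ≤ fuel →
      PySem.Chars.replace.go old nw fuel l acc
        = acc.reverse ++ PySem.Chars.replace.go old nw l.length l [] := by
  intro fuel
  induction fuel using Nat.strong_induction_on with
  | _ fuel ih =>
    match fuel with
    | 0 =>
      intro l acc hl
      have : l = [] := List.eq_nil_of_length_eq_zero (Nat.le_zero.mp hl)
      subst this
      simp [PySem.Chars.replace.go]
    | fuel + 1 =>
      intro l acc hl
      match l with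
      | [] => simp [PySem.Chars.replace.go]
      | c :: t =>
        have hop : 0 < old.length := List.length_pos_iff.mpr hold
        simp only [List.length_cons] at hl
        by_cases hp : old.isPrefixOf (c :: t)
        · have hple := (List.isPrefixOf_iff_prefix.mp hp).length_le
          simp only [List.length_cons] at hple
          have hdl : ((c :: t).drop old.length).length = t.length + 1 - old.length := by
            simp [List.length_drop]
          simp only [List.length_cons, PySem.Chars.replace.go]
          rw [if_pos hp, if_pos hp]
          rw [ih fuel (by omega) _ _ (by rw [hdl]; omega),
              ih t.length (by omega) _ _ (by rw [hdl]; omega)]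
          simp
        · simp only [List.length_cons, PySem.Chars.replace.go]
          rw [if_neg hp, if_neg hp]
          rw [ih fuel (by omega) t (c :: acc) (by omega),
              ih t.length (by omega) t [c] le_rfl]
          simp

lemma replace_eq_repF (old nw : List Char) (hold : old ≠ []) :
    ∀ l, PySem.Chars.replace l old nw = pvRepF old nw l := by
  have main : ∀ (n : Nat) (l : List Char), l.length ≤ n →
      PySem.Chars.replace.go old nw l.length l [] = pvRepF old nw l := by
    intro n
    induction n with
    | zero =>
      intro l hl
      have : l = [] := List.eq_nil_of_length_eq_zero (Nat.le_zero.mp hl)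
      subst this
      simp [PySem.Chars.replace.go, repF_nil]
    | succ n ih =>
      intro l hl
      match l with
      | [] => simp [PySem.Chars.replace.go, repF_nil]
      | c :: t =>
        have hop : 0 < old.length := List.length_pos_iff.mpr hold
        simp only [List.length_cons] at hl
        by_cases hp : old.isPrefixOf (c :: t)
        · have hpre := List.isPrefixOf_iff_prefix.mp hp
          have hple := hpre.length_le
          simp only [List.length_cons] at hple
          have hdl : ((c :: t).drop old.length).length = t.length + 1 - old.length := by
            simp [List.length_drop]
          simp only [List.length_cons, PySem.Chars.replace.go]
          rw [if_pos hp]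
          rw [go_acc old nw hold t.length _ _ (by rw [hdl]; omega)]
          rw [ih ((c :: t).drop old.length) (by rw [hdl]; omega)]
          obtain ⟨r, hr⟩ := hpre
          rw [← hr, List.drop_left, repF_match old nw r hold]
          simp
        · have hnp : ¬ old <+: (c :: t) := fun hc => hp (List.isPrefixOf_iff_prefix.mpr hc)
          simp only [List.length_cons, PySem.Chars.replace.go]
          rw [if_neg hp]
          rw [go_acc old nw hold t.length t [c] le_rfl]
          rw [ih t (by omega)]
          rw [repF_head old nw c t hnp]
          simp
  intro l
  have hne : old.isEmpty = false := by
    cases old with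
    | nil => exact absurd rfl hold
    | cons a as => rfl
  rw [PySem.Chars.replace, hne]
  simp only [Bool.false_eq_true, if_false]
  exact main l.length l le_rfl

-- if no occurrence of `old` can start inside `p` (whatever follows), a replace
-- distributes over the prefix `p`
lemma repF_dist (old nw : List Char) (_hold : old ≠ []) (p : List Char)
    (hcond : ∀ m, m < p.length → ¬ old <+: p.drop m ∧ ¬ p.drop m <+: old) :
    ∀ q, pvRepF old nw (p ++ q) = p ++ pvRepF old nw q := by
  induction p with
  | nil => intro q; rfl
  | cons c p ih =>
    intro q
    have h0 := hcond 0 (by simp)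
    simp only [List.drop_zero] at h0
    have hnp : ¬ old <+: ((c :: p) ++ q) := by
      intro hpre
      by_cases hle : old.length ≤ (c :: p).length
      · exact h0.1 (List.prefix_of_prefix_length_le hpre (List.prefix_append _ _) hle)
      · exact h0.2 (List.prefix_of_prefix_length_le (List.prefix_append _ _) hpre (by omega))
    rw [List.cons_append, repF_head old nw c (p ++ q) (by rwa [List.cons_append] at hnp)]
    rw [ih (fun m hm => by simpa using hcond (m + 1) (by simpa using hm)) q]
    simp

-- replacing `old` by `nw` cannot create a new occurrence of (a suffix of) `pat`
-- when no suffix of `pat` is prefix-compatible with `nw`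
lemma repF_nocreate (old nw pat : List Char) (hold : old ≠ [])
    (hA : ∀ m, m < pat.length → ¬ pat.drop m <+: nw ∧ ¬ nw <+: pat.drop m) :
    ∀ (n : Nat) (t : List Char) (m : Nat), t.length ≤ n →
      ¬ pat.drop m <+: t → ¬ pat.drop m <+: pvRepF old nw t := by
  intro n
  induction n with
  | zero =>
    intro t m hl hnp
    have : t = [] := List.eq_nil_of_length_eq_zero (Nat.le_zero.mp hl)
    subst this
    rw [repF_nil]
    exact hnp
  | succ n ih =>
    intro t m hl hnp hcon
    have hm : m < pat.length := by
      by_contra hge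
      rw [List.drop_eq_nil_of_le (Nat.le_of_not_lt hge)] at hnp
      exact hnp (List.nil_prefix)
    match t with
    | [] =>
      rw [repF_nil] at hcon
      exact hnp (List.prefix_nil.mp hcon ▸ List.nil_prefix)
    | c :: t' =>
      by_cases hpre : old <+: (c :: t')
      · obtain ⟨r, hr⟩ := hpre
        rw [← hr, repF_match old nw r hold] at hcon
        by_cases hle : (pat.drop m).length ≤ nw.length
        · exact (hA m hm).1 (List.prefix_of_prefix_length_le hcon (List.prefix_append _ _) hle)
        · exact (hA m hm).2 (List.prefix_of_prefix_length_le (List.prefix_append _ _) hcon (by omega))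
      · rw [repF_head old nw c t' hpre] at hcon
        rw [List.drop_eq_getElem_cons hm] at hcon hnp
        rcases List.cons_prefix_cons.mp hcon with ⟨hc, htail⟩
        by_cases hend : pat.drop (m + 1) = []
        · rw [hend] at hnp
          exact hnp (List.cons_prefix_cons.mpr ⟨hc, List.nil_prefix⟩)
        · have hnp' : ¬ pat.drop (m + 1) <+: t' := by
            intro hP
            exact hnp (List.cons_prefix_cons.mpr ⟨hc, hP⟩)
          exact ih t' (m + 1) (by simp at hl; omega) hnp' htail

lemma nocreate0 (old nw pat : List Char) (hold : old ≠ [])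
    (hA : ∀ m, m < pat.length → ¬ pat.drop m <+: nw ∧ ¬ nw <+: pat.drop m)
    (t : List Char) (h : ¬ pat <+: t) : ¬ pat <+: pvRepF old nw t := by
  have := repF_nocreate old nw pat hold hA t.length t 0 le_rfl (by simpa using h)
  simpa using this

-- the 7-step replace chain of A, per word
def pvChain (l : List Char) : List Char :=
  pvRepF pvD7 pvE7 (pvRepF pvD6 pvE6 (pvRepF pvD5 pvE5 (pvRepF pvD4 pvE4
    (pvRepF pvD3 pvE3 (pvRepF pvD2 pvE2 (pvRepF pvD1 pvE1 l))))))

lemma pvScan_nil : pvScan [] = [] := by rw [pvScan]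

lemma pvScan_cons (c : Char) (t : List Char) :
    pvScan (c :: t) =
      match pvTable.find? (fun p => p.1.isPrefixOf (c :: t)) with
      | some p => p.2 ++ pvScan (t.drop (p.1.length - 1))
      | none => c :: pvScan t := by
  rw [pvScan]

lemma pvScan_prefix (dd ee r : List Char) (hdd : dd ≠ [])
    (hfind : pvTable.find? (fun p => p.1.isPrefixOf (dd ++ r)) = some (dd, ee)) :
    pvScan (dd ++ r) = ee ++ pvScan r := by
  match hD : dd with
  | [] => exact absurd rfl hdd
  | c :: d =>
    rw [List.cons_append, pvScan_cons, ← List.cons_append, hfind]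
    simp only [List.length_cons, Nat.add_sub_cancel, List.drop_left]

lemma pvScan_step (c : Char) (t : List Char)
    (hfind : pvTable.find? (fun p => p.1.isPrefixOf (c :: t)) = none) :
    pvScan (c :: t) = c :: pvScan t := by
  rw [pvScan_cons, hfind]

set_option maxHeartbeats 1600000 in
lemma chain_eq_scan : ∀ (n : Nat) (l : List Char), l.length ≤ n → pvChain l = pvScan l := by
  intro n
  induction n with
  | zero =>
    intro l hl
    have : l = [] := List.eq_nil_of_length_eq_zero (Nat.le_zero.mp hl)
    subst this
    simp [pvChain, repF_nil, pvScan_nil]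
  | succ n ih =>
    intro l hl
    by_cases h1 : pvD1 <+: l
    · obtain ⟨r, rfl⟩ := h1
      have hb1 : pvD1.isPrefixOf (pvD1 ++ r) = true :=
        List.isPrefixOf_iff_prefix.mpr (List.prefix_append _ _)
      have hfind : pvTable.find? (fun p => p.1.isPrefixOf (pvD1 ++ r)) = some (pvD1, pvE1) := by
        simp [pvTable, hb1]
      have hc : pvChain (pvD1 ++ r) = pvE1 ++ pvChain r := by
        unfold pvChain
        rw [repF_match pvD1 pvE1 _ (by decide),
            repF_dist pvD2 pvE2 (by decide) pvE1 (by decide),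
            repF_dist pvD3 pvE3 (by decide) pvE1 (by decide),
            repF_dist pvD4 pvE4 (by decide) pvE1 (by decide),
            repF_dist pvD5 pvE5 (by decide) pvE1 (by decide),
            repF_dist pvD6 pvE6 (by decide) pvE1 (by decide),
            repF_dist pvD7 pvE7 (by decide) pvE1 (by decide)]
      have hlen : r.length ≤ n := by
        have hd : 0 < pvD1.length := by decide
        simp [List.length_append] at hl; omega
      rw [hc, pvScan_prefix pvD1 pvE1 r (by decide) hfind, ih r hlen]
    by_cases h2 : pvD2 <+: l
    · obtain ⟨r, rfl⟩ := h2
      have hb1 : pvD1.isPrefixOf (pvD2 ++ r) = false := by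
        rw [← Bool.not_eq_true]; exact fun hb => h1 (List.isPrefixOf_iff_prefix.mp hb)
      have hb2 : pvD2.isPrefixOf (pvD2 ++ r) = true :=
        List.isPrefixOf_iff_prefix.mpr (List.prefix_append _ _)
      have hfind : pvTable.find? (fun p => p.1.isPrefixOf (pvD2 ++ r)) = some (pvD2, pvE2) := by
        simp [pvTable, hb1, hb2]
      have hc : pvChain (pvD2 ++ r) = pvE2 ++ pvChain r := by
        unfold pvChain
        rw [repF_dist pvD1 pvE1 (by decide) pvD2 (by decide),
            repF_match pvD2 pvE2 _ (by decide),
            repF_dist pvD3 pvE3 (by decide) pvE2 (by decide),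
            repF_dist pvD4 pvE4 (by decide) pvE2 (by decide),
            repF_dist pvD5 pvE5 (by decide) pvE2 (by decide),
            repF_dist pvD6 pvE6 (by decide) pvE2 (by decide),
            repF_dist pvD7 pvE7 (by decide) pvE2 (by decide)]
      have hlen : r.length ≤ n := by
        have hd : 0 < pvD2.length := by decide
        simp [List.length_append] at hl; omega
      rw [hc, pvScan_prefix pvD2 pvE2 r (by decide) hfind, ih r hlen]
    by_cases h3 : pvD3 <+: l
    · obtain ⟨r, rfl⟩ := h3
      have hb1 : pvD1.isPrefixOf (pvD3 ++ r) = false := by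
        rw [← Bool.not_eq_true]; exact fun hb => h1 (List.isPrefixOf_iff_prefix.mp hb)
      have hb2 : pvD2.isPrefixOf (pvD3 ++ r) = false := by
        rw [← Bool.not_eq_true]; exact fun hb => h2 (List.isPrefixOf_iff_prefix.mp hb)
      have hb3 : pvD3.isPrefixOf (pvD3 ++ r) = true :=
        List.isPrefixOf_iff_prefix.mpr (List.prefix_append _ _)
      have hfind : pvTable.find? (fun p => p.1.isPrefixOf (pvD3 ++ r)) = some (pvD3, pvE3) := by
        simp [pvTable, hb1, hb2, hb3]
      have hc : pvChain (pvD3 ++ r) = pvE3 ++ pvChain r := by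
        unfold pvChain
        rw [repF_dist pvD1 pvE1 (by decide) pvD3 (by decide),
            repF_dist pvD2 pvE2 (by decide) pvD3 (by decide),
            repF_match pvD3 pvE3 _ (by decide),
            repF_dist pvD4 pvE4 (by decide) pvE3 (by decide),
            repF_dist pvD5 pvE5 (by decide) pvE3 (by decide),
            repF_dist pvD6 pvE6 (by decide) pvE3 (by decide),
            repF_dist pvD7 pvE7 (by decide) pvE3 (by decide)]
      have hlen : r.length ≤ n := by
        have hd : 0 < pvD3.length := by decide
        simp [List.length_append] at hl; omega
      rw [hc, pvScan_prefix pvD3 pvE3 r (by decide) hfind, ih r hlen]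
    by_cases h4 : pvD4 <+: l
    · obtain ⟨r, rfl⟩ := h4
      have hb1 : pvD1.isPrefixOf (pvD4 ++ r) = false := by
        rw [← Bool.not_eq_true]; exact fun hb => h1 (List.isPrefixOf_iff_prefix.mp hb)
      have hb2 : pvD2.isPrefixOf (pvD4 ++ r) = false := by
        rw [← Bool.not_eq_true]; exact fun hb => h2 (List.isPrefixOf_iff_prefix.mp hb)
      have hb3 : pvD3.isPrefixOf (pvD4 ++ r) = false := by
        rw [← Bool.not_eq_true]; exact fun hb => h3 (List.isPrefixOf_iff_prefix.mp hb)
      have hb4 : pvD4.isPrefixOf (pvD4 ++ r) = true :=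
        List.isPrefixOf_iff_prefix.mpr (List.prefix_append _ _)
      have hfind : pvTable.find? (fun p => p.1.isPrefixOf (pvD4 ++ r)) = some (pvD4, pvE4) := by
        simp [pvTable, hb1, hb2, hb3, hb4]
      have hc : pvChain (pvD4 ++ r) = pvE4 ++ pvChain r := by
        unfold pvChain
        rw [repF_dist pvD1 pvE1 (by decide) pvD4 (by decide),
            repF_dist pvD2 pvE2 (by decide) pvD4 (by decide),
            repF_dist pvD3 pvE3 (by decide) pvD4 (by decide),
            repF_match pvD4 pvE4 _ (by decide),
            repF_dist pvD5 pvE5 (by decide) pvE4 (by decide),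
            repF_dist pvD6 pvE6 (by decide) pvE4 (by decide),
            repF_dist pvD7 pvE7 (by decide) pvE4 (by decide)]
      have hlen : r.length ≤ n := by
        have hd : 0 < pvD4.length := by decide
        simp [List.length_append] at hl; omega
      rw [hc, pvScan_prefix pvD4 pvE4 r (by decide) hfind, ih r hlen]
    by_cases h5 : pvD5 <+: l
    · obtain ⟨r, rfl⟩ := h5
      have hb1 : pvD1.isPrefixOf (pvD5 ++ r) = false := by
        rw [← Bool.not_eq_true]; exact fun hb => h1 (List.isPrefixOf_iff_prefix.mp hb)
      have hb2 : pvD2.isPrefixOf (pvD5 ++ r) = false := by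
        rw [← Bool.not_eq_true]; exact fun hb => h2 (List.isPrefixOf_iff_prefix.mp hb)
      have hb3 : pvD3.isPrefixOf (pvD5 ++ r) = false := by
        rw [← Bool.not_eq_true]; exact fun hb => h3 (List.isPrefixOf_iff_prefix.mp hb)
      have hb4 : pvD4.isPrefixOf (pvD5 ++ r) = false := by
        rw [← Bool.not_eq_true]; exact fun hb => h4 (List.isPrefixOf_iff_prefix.mp hb)
      have hb5 : pvD5.isPrefixOf (pvD5 ++ r) = true :=
        List.isPrefixOf_iff_prefix.mpr (List.prefix_append _ _)
      have hfind : pvTable.find? (fun p => p.1.isPrefixOf (pvD5 ++ r)) = some (pvD5, pvE5) := by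
        simp [pvTable, hb1, hb2, hb3, hb4, hb5]
      have hc : pvChain (pvD5 ++ r) = pvE5 ++ pvChain r := by
        unfold pvChain
        rw [repF_dist pvD1 pvE1 (by decide) pvD5 (by decide),
            repF_dist pvD2 pvE2 (by decide) pvD5 (by decide),
            repF_dist pvD3 pvE3 (by decide) pvD5 (by decide),
            repF_dist pvD4 pvE4 (by decide) pvD5 (by decide),
            repF_match pvD5 pvE5 _ (by decide),
            repF_dist pvD6 pvE6 (by decide) pvE5 (by decide),
            repF_dist pvD7 pvE7 (by decide) pvE5 (by decide)]
      have hlen : r.length ≤ n := by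
        have hd : 0 < pvD5.length := by decide
        simp [List.length_append] at hl; omega
      rw [hc, pvScan_prefix pvD5 pvE5 r (by decide) hfind, ih r hlen]
    by_cases h6 : pvD6 <+: l
    · obtain ⟨r, rfl⟩ := h6
      have hb1 : pvD1.isPrefixOf (pvD6 ++ r) = false := by
        rw [← Bool.not_eq_true]; exact fun hb => h1 (List.isPrefixOf_iff_prefix.mp hb)
      have hb2 : pvD2.isPrefixOf (pvD6 ++ r) = false := by
        rw [← Bool.not_eq_true]; exact fun hb => h2 (List.isPrefixOf_iff_prefix.mp hb)
      have hb3 : pvD3.isPrefixOf (pvD6 ++ r) = false := by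
        rw [← Bool.not_eq_true]; exact fun hb => h3 (List.isPrefixOf_iff_prefix.mp hb)
      have hb4 : pvD4.isPrefixOf (pvD6 ++ r) = false := by
        rw [← Bool.not_eq_true]; exact fun hb => h4 (List.isPrefixOf_iff_prefix.mp hb)
      have hb5 : pvD5.isPrefixOf (pvD6 ++ r) = false := by
        rw [← Bool.not_eq_true]; exact fun hb => h5 (List.isPrefixOf_iff_prefix.mp hb)
      have hb6 : pvD6.isPrefixOf (pvD6 ++ r) = true :=
        List.isPrefixOf_iff_prefix.mpr (List.prefix_append _ _)
      have hfind : pvTable.find? (fun p => p.1.isPrefixOf (pvD6 ++ r)) = some (pvD6, pvE6) := by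
        simp [pvTable, hb1, hb2, hb3, hb4, hb5, hb6]
      have hc : pvChain (pvD6 ++ r) = pvE6 ++ pvChain r := by
        unfold pvChain
        rw [repF_dist pvD1 pvE1 (by decide) pvD6 (by decide),
            repF_dist pvD2 pvE2 (by decide) pvD6 (by decide),
            repF_dist pvD3 pvE3 (by decide) pvD6 (by decide),
            repF_dist pvD4 pvE4 (by decide) pvD6 (by decide),
            repF_dist pvD5 pvE5 (by decide) pvD6 (by decide),
            repF_match pvD6 pvE6 _ (by decide),
            repF_dist pvD7 pvE7 (by decide) pvE6 (by decide)]
      have hlen : r.length ≤ n := by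
        have hd : 0 < pvD6.length := by decide
        simp [List.length_append] at hl; omega
      rw [hc, pvScan_prefix pvD6 pvE6 r (by decide) hfind, ih r hlen]
    by_cases h7 : pvD7 <+: l
    · obtain ⟨r, rfl⟩ := h7
      have hb1 : pvD1.isPrefixOf (pvD7 ++ r) = false := by
        rw [← Bool.not_eq_true]; exact fun hb => h1 (List.isPrefixOf_iff_prefix.mp hb)
      have hb2 : pvD2.isPrefixOf (pvD7 ++ r) = false := by
        rw [← Bool.not_eq_true]; exact fun hb => h2 (List.isPrefixOf_iff_prefix.mp hb)
      have hb3 : pvD3.isPrefixOf (pvD7 ++ r) = false := by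
        rw [← Bool.not_eq_true]; exact fun hb => h3 (List.isPrefixOf_iff_prefix.mp hb)
      have hb4 : pvD4.isPrefixOf (pvD7 ++ r) = false := by
        rw [← Bool.not_eq_true]; exact fun hb => h4 (List.isPrefixOf_iff_prefix.mp hb)
      have hb5 : pvD5.isPrefixOf (pvD7 ++ r) = false := by
        rw [← Bool.not_eq_true]; exact fun hb => h5 (List.isPrefixOf_iff_prefix.mp hb)
      have hb6 : pvD6.isPrefixOf (pvD7 ++ r) = false := by
        rw [← Bool.not_eq_true]; exact fun hb => h6 (List.isPrefixOf_iff_prefix.mp hb)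
      have hb7 : pvD7.isPrefixOf (pvD7 ++ r) = true :=
        List.isPrefixOf_iff_prefix.mpr (List.prefix_append _ _)
      have hfind : pvTable.find? (fun p => p.1.isPrefixOf (pvD7 ++ r)) = some (pvD7, pvE7) := by
        simp [pvTable, hb1, hb2, hb3, hb4, hb5, hb6, hb7]
      have hc : pvChain (pvD7 ++ r) = pvE7 ++ pvChain r := by
        unfold pvChain
        rw [repF_dist pvD1 pvE1 (by decide) pvD7 (by decide),
            repF_dist pvD2 pvE2 (by decide) pvD7 (by decide),
            repF_dist pvD3 pvE3 (by decide) pvD7 (by decide),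
            repF_dist pvD4 pvE4 (by decide) pvD7 (by decide),
            repF_dist pvD5 pvE5 (by decide) pvD7 (by decide),
            repF_dist pvD6 pvE6 (by decide) pvD7 (by decide),
            repF_match pvD7 pvE7 _ (by decide)]
      have hlen : r.length ≤ n := by
        have hd : 0 < pvD7.length := by decide
        simp [List.length_append] at hl; omega
      rw [hc, pvScan_prefix pvD7 pvE7 r (by decide) hfind, ih r hlen]
    -- no phrase starts at the head of l
    match l with
    | [] => simp [pvChain, repF_nil, pvScan_nil]
    | c :: t =>
      have hb1 : pvD1.isPrefixOf (c :: t) = false := by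
        rw [← Bool.not_eq_true]; exact fun hb => h1 (List.isPrefixOf_iff_prefix.mp hb)
      have hb2 : pvD2.isPrefixOf (c :: t) = false := by
        rw [← Bool.not_eq_true]; exact fun hb => h2 (List.isPrefixOf_iff_prefix.mp hb)
      have hb3 : pvD3.isPrefixOf (c :: t) = false := by
        rw [← Bool.not_eq_true]; exact fun hb => h3 (List.isPrefixOf_iff_prefix.mp hb)
      have hb4 : pvD4.isPrefixOf (c :: t) = false := by
        rw [← Bool.not_eq_true]; exact fun hb => h4 (List.isPrefixOf_iff_prefix.mp hb)
      have hb5 : pvD5.isPrefixOf (c :: t) = false := by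
        rw [← Bool.not_eq_true]; exact fun hb => h5 (List.isPrefixOf_iff_prefix.mp hb)
      have hb6 : pvD6.isPrefixOf (c :: t) = false := by
        rw [← Bool.not_eq_true]; exact fun hb => h6 (List.isPrefixOf_iff_prefix.mp hb)
      have hb7 : pvD7.isPrefixOf (c :: t) = false := by
        rw [← Bool.not_eq_true]; exact fun hb => h7 (List.isPrefixOf_iff_prefix.mp hb)
      have hfind : pvTable.find? (fun p => p.1.isPrefixOf (c :: t)) = none := by
        simp [pvTable, hb1, hb2, hb3, hb4, hb5, hb6, hb7]
      have g2_1 : ¬ pvD2 <+: pvRepF pvD1 pvE1 (c :: t) :=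
        nocreate0 pvD1 pvE1 pvD2 (by decide) (by decide) _ h2
      have g3_1 : ¬ pvD3 <+: pvRepF pvD1 pvE1 (c :: t) :=
        nocreate0 pvD1 pvE1 pvD3 (by decide) (by decide) _ h3
      have g3_2 : ¬ pvD3 <+: pvRepF pvD2 pvE2 (pvRepF pvD1 pvE1 (c :: t)) :=
        nocreate0 pvD2 pvE2 pvD3 (by decide) (by decide) _ g3_1
      have g4_1 : ¬ pvD4 <+: pvRepF pvD1 pvE1 (c :: t) :=
        nocreate0 pvD1 pvE1 pvD4 (by decide) (by decide) _ h4
      have g4_2 : ¬ pvD4 <+: pvRepF pvD2 pvE2 (pvRepF pvD1 pvE1 (c :: t)) :=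
        nocreate0 pvD2 pvE2 pvD4 (by decide) (by decide) _ g4_1
      have g4_3 : ¬ pvD4 <+: pvRepF pvD3 pvE3 (pvRepF pvD2 pvE2 (pvRepF pvD1 pvE1 (c :: t))) :=
        nocreate0 pvD3 pvE3 pvD4 (by decide) (by decide) _ g4_2
      have g5_1 : ¬ pvD5 <+: pvRepF pvD1 pvE1 (c :: t) :=
        nocreate0 pvD1 pvE1 pvD5 (by decide) (by decide) _ h5
      have g5_2 : ¬ pvD5 <+: pvRepF pvD2 pvE2 (pvRepF pvD1 pvE1 (c :: t)) :=
        nocreate0 pvD2 pvE2 pvD5 (by decide) (by decide) _ g5_1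
      have g5_3 : ¬ pvD5 <+: pvRepF pvD3 pvE3 (pvRepF pvD2 pvE2 (pvRepF pvD1 pvE1 (c :: t))) :=
        nocreate0 pvD3 pvE3 pvD5 (by decide) (by decide) _ g5_2
      have g5_4 : ¬ pvD5 <+: pvRepF pvD4 pvE4 (pvRepF pvD3 pvE3 (pvRepF pvD2 pvE2 (pvRepF pvD1 pvE1 (c :: t)))) :=
        nocreate0 pvD4 pvE4 pvD5 (by decide) (by decide) _ g5_3
      have g6_1 : ¬ pvD6 <+: pvRepF pvD1 pvE1 (c :: t) :=
        nocreate0 pvD1 pvE1 pvD6 (by decide) (by decide) _ h6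
      have g6_2 : ¬ pvD6 <+: pvRepF pvD2 pvE2 (pvRepF pvD1 pvE1 (c :: t)) :=
        nocreate0 pvD2 pvE2 pvD6 (by decide) (by decide) _ g6_1
      have g6_3 : ¬ pvD6 <+: pvRepF pvD3 pvE3 (pvRepF pvD2 pvE2 (pvRepF pvD1 pvE1 (c :: t))) :=
        nocreate0 pvD3 pvE3 pvD6 (by decide) (by decide) _ g6_2
      have g6_4 : ¬ pvD6 <+: pvRepF pvD4 pvE4 (pvRepF pvD3 pvE3 (pvRepF pvD2 pvE2 (pvRepF pvD1 pvE1 (c :: t)))) :=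
        nocreate0 pvD4 pvE4 pvD6 (by decide) (by decide) _ g6_3
      have g6_5 : ¬ pvD6 <+: pvRepF pvD5 pvE5 (pvRepF pvD4 pvE4 (pvRepF pvD3 pvE3 (pvRepF pvD2 pvE2 (pvRepF pvD1 pvE1 (c :: t))))) :=
        nocreate0 pvD5 pvE5 pvD6 (by decide) (by decide) _ g6_4
      have g7_1 : ¬ pvD7 <+: pvRepF pvD1 pvE1 (c :: t) :=
        nocreate0 pvD1 pvE1 pvD7 (by decide) (by decide) _ h7
      have g7_2 : ¬ pvD7 <+: pvRepF pvD2 pvE2 (pvRepF pvD1 pvE1 (c :: t)) :=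
        nocreate0 pvD2 pvE2 pvD7 (by decide) (by decide) _ g7_1
      have g7_3 : ¬ pvD7 <+: pvRepF pvD3 pvE3 (pvRepF pvD2 pvE2 (pvRepF pvD1 pvE1 (c :: t))) :=
        nocreate0 pvD3 pvE3 pvD7 (by decide) (by decide) _ g7_2
      have g7_4 : ¬ pvD7 <+: pvRepF pvD4 pvE4 (pvRepF pvD3 pvE3 (pvRepF pvD2 pvE2 (pvRepF pvD1 pvE1 (c :: t)))) :=
        nocreate0 pvD4 pvE4 pvD7 (by decide) (by decide) _ g7_3
      have g7_5 : ¬ pvD7 <+: pvRepF pvD5 pvE5 (pvRepF pvD4 pvE4 (pvRepF pvD3 pvE3 (pvRepF pvD2 pvE2 (pvRepF pvD1 pvE1 (c :: t))))) :=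
        nocreate0 pvD5 pvE5 pvD7 (by decide) (by decide) _ g7_4
      have g7_6 : ¬ pvD7 <+: pvRepF pvD6 pvE6 (pvRepF pvD5 pvE5 (pvRepF pvD4 pvE4 (pvRepF pvD3 pvE3 (pvRepF pvD2 pvE2 (pvRepF pvD1 pvE1 (c :: t)))))) :=
        nocreate0 pvD6 pvE6 pvD7 (by decide) (by decide) _ g7_5
      have e1 : pvRepF pvD1 pvE1 (c :: t) = c :: pvRepF pvD1 pvE1 t := repF_head _ _ _ _ h1
      rw [e1] at g2_1
      have e2 : pvRepF pvD2 pvE2 (c :: pvRepF pvD1 pvE1 (t)) = c :: pvRepF pvD2 pvE2 (pvRepF pvD1 pvE1 (t)) :=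
        repF_head _ _ _ _ g2_1
      rw [e1, e2] at g3_2
      have e3 : pvRepF pvD3 pvE3 (c :: pvRepF pvD2 pvE2 (pvRepF pvD1 pvE1 (t))) = c :: pvRepF pvD3 pvE3 (pvRepF pvD2 pvE2 (pvRepF pvD1 pvE1 (t))) :=
        repF_head _ _ _ _ g3_2
      rw [e1, e2, e3] at g4_3
      have e4 : pvRepF pvD4 pvE4 (c :: pvRepF pvD3 pvE3 (pvRepF pvD2 pvE2 (pvRepF pvD1 pvE1 (t)))) = c :: pvRepF pvD4 pvE4 (pvRepF pvD3 pvE3 (pvRepF pvD2 pvE2 (pvRepF pvD1 pvE1 (t)))) :=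
        repF_head _ _ _ _ g4_3
      rw [e1, e2, e3, e4] at g5_4
      have e5 : pvRepF pvD5 pvE5 (c :: pvRepF pvD4 pvE4 (pvRepF pvD3 pvE3 (pvRepF pvD2 pvE2 (pvRepF pvD1 pvE1 (t))))) = c :: pvRepF pvD5 pvE5 (pvRepF pvD4 pvE4 (pvRepF pvD3 pvE3 (pvRepF pvD2 pvE2 (pvRepF pvD1 pvE1 (t))))) :=
        repF_head _ _ _ _ g5_4
      rw [e1, e2, e3, e4, e5] at g6_5
      have e6 : pvRepF pvD6 pvE6 (c :: pvRepF pvD5 pvE5 (pvRepF pvD4 pvE4 (pvRepF pvD3 pvE3 (pvRepF pvD2 pvE2 (pvRepF pvD1 pvE1 (t)))))) = c :: pvRepF pvD6 pvE6 (pvRepF pvD5 pvE5 (pvRepF pvD4 pvE4 (pvRepF pvD3 pvE3 (pvRepF pvD2 pvE2 (pvRepF pvD1 pvE1 (t)))))) :=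
        repF_head _ _ _ _ g6_5
      rw [e1, e2, e3, e4, e5, e6] at g7_6
      have e7 : pvRepF pvD7 pvE7 (c :: pvRepF pvD6 pvE6 (pvRepF pvD5 pvE5 (pvRepF pvD4 pvE4 (pvRepF pvD3 pvE3 (pvRepF pvD2 pvE2 (pvRepF pvD1 pvE1 (t))))))) = c :: pvRepF pvD7 pvE7 (pvRepF pvD6 pvE6 (pvRepF pvD5 pvE5 (pvRepF pvD4 pvE4 (pvRepF pvD3 pvE3 (pvRepF pvD2 pvE2 (pvRepF pvD1 pvE1 (t))))))) :=
        repF_head _ _ _ _ g7_6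
      have hc : pvChain (c :: t) = c :: pvChain t := by
        unfold pvChain
        rw [e1, e2, e3, e4, e5, e6, e7]
      have hlen : t.length ≤ n := by simp at hl; omega
      rw [hc, pvScan_step c t hfind, ih t hlen]

lemma word_eq (w : String) :
    PySem.Str.replace (PySem.Str.replace (PySem.Str.replace (PySem.Str.replace
      (PySem.Str.replace (PySem.Str.replace (PySem.Str.replace w
        "Lng" "Longitude") "Lat" "Latitude")
        "Overstromingsbeeld primaire keringen" "Flooding risk of primary embankments")
        "Overstromingsbeeld regionale keringen" "Flooding risk of regional embankments")
        "Bodemdaling Huidig" "Ground subsidence")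
        "inundatiediepte T100" "Bottlenecks excessive rainwater")
        "Bodemberging bij grondwaterstand gelijk aan streefpeil" "Soil water storage capacity"
    = String.ofList (pvChain w.toList) := by
  simp only [PySem.Str.replace, String.toList_ofList]
  rw [replace_eq_repF "Lng".toList "Longitude".toList (by decide),
      replace_eq_repF "Lat".toList "Latitude".toList (by decide),
      replace_eq_repF "Overstromingsbeeld primaire keringen".toList _ (by decide),
      replace_eq_repF "Overstromingsbeeld regionale keringen".toList _ (by decide),
      replace_eq_repF "Bodemdaling Huidig".toList _ (by decide),
      replace_eq_repF "inundatiediepte T100".toList _ (by decide),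
      replace_eq_repF "Bodemberging bij grondwaterstand gelijk aan streefpeil".toList _ (by decide)]
  rfl

lemma portA_eq (words : List String) :
    translate_names words = words.map (fun w => String.ofList (pvChain w.toList)) := by
  unfold translate_names
  simp only [List.zip_cons_cons, List.zip_nil_right, List.foldl_cons, List.foldl_nil,
    List.map_map]
  refine List.map_congr_left (fun w _ => ?_)
  exact word_eq w

-- ===== VERDICT (by name: the statement is the Claim_ definition above) =====
theorem translate_names_spec : Claim_equal_translate_names := by
  intro words _
  unfold Spec_translate_names
  rw [portA_eq]
  unfold translate_names_alt
  refine List.map_congr_left (fun w _ => ?_)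
  rw [chain_eq_scan w.toList.length w.toList le_rfl]
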